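-- pv_equiv track=rewrite | github.com/hashemi/refparser | refparser/normalizers.py | is_head_heavy
-- ===== SOURCE A (Python) =====
-- def is_head_heavy(items):
--     """
--     This algorthm takes a list of items and returns True if the first item is
--     larger than the last item and False otherwise. If the items are equal,
--     it repeats the test working its way from the outermost to inner most pair
--     of items. If the list is symmetrical it returns False.
--     """
--     head = 0
--     tail = len(items) - 1
--     while head < tail:
--         if items[head] > items[tail]:
--             return True
--         elif items[head] < items[tail]:
--             return False
--         head += 1
--         tail -= 1
--     return False
-- ===== SOURCE B (Python) =====
-- def is_head_heavy(items):
--     return items > items[::-1]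
-- ===== Notes on version B (the rewrite author's own statement) =====
-- stated objective: simpler
-- what changed: Replaces the explicit outside-in two-pointer while loop with a single lexicographic comparison of the list against its own reverse (items > items[::-1]), which decides at the first differing mirror pair.
import Mathlib
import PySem

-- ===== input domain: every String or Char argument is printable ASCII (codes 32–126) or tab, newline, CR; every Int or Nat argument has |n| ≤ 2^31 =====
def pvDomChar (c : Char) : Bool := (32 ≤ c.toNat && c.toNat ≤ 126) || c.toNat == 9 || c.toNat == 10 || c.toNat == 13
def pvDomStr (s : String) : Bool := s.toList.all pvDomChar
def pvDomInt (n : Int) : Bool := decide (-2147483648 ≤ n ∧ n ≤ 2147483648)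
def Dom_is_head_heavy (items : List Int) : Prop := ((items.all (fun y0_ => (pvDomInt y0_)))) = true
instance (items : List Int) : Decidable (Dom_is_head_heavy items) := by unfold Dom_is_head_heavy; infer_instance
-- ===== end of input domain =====

-- B replaces the explicit outside-in two-pointer loop with one lexicographic
-- comparison of the list against its own reverse (objective: simpler).


-- ===== PORT A =====
-- the 'while head < tail' loop of A; the 'none' branches are unreachable
-- for the initial call (indices stay inside the list)
def isHeadHeavyLoop (items : List Int) (head tail : Int) : Bool :=
  if _h : head < tail then
    match PySem.List.pyGet? items head, PySem.List.pyGet? items tail with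
    | some a, some b =>
      if a > b then true
      else if a < b then false
      else isHeadHeavyLoop items (head + 1) (tail - 1)
    | _, _ => false
  else false
termination_by (tail - head).toNat
decreasing_by omega

def is_head_heavy (items : List Int) : Bool :=
  isHeadHeavyLoop items 0 ((items.length : Int) - 1)

-- ===== PORT B =====
-- Python's list '>' (lexicographic; first differing element decides,
-- else the longer list is greater)
def pyListGt : List Int → List Int → Bool
  | _ :: _, [] => true
  | [], _ => false
  | a :: as, b :: bs => if a ≠ b then decide (a > b) else pyListGt as bs

def is_head_heavy_alt (items : List Int) : Bool :=
  pyListGt items items.reverse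

-- ===== PRECONDITION & SPEC =====
def Spec_is_head_heavy (items : List Int) (out : Bool) : Prop := out = is_head_heavy_alt items
instance (items : List Int) (out : Bool) : Decidable (Spec_is_head_heavy items out) := by unfold Spec_is_head_heavy; infer_instance

-- ===== CLAIM (what is proved, stated in full; the proofs are below) =====
def Claim_equal_is_head_heavy : Prop := ∀ (items : List Int), Dom_is_head_heavy items → Spec_is_head_heavy items (is_head_heavy items)

-- ===== LEMMAS AND PROOFS =====

-- appending the same element to equal-length lists does not change pyListGt
theorem pyListGt_append_same (ys zs : List Int) (c : Int) (h : ys.length = zs.length) :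
    pyListGt (ys ++ [c]) (zs ++ [c]) = pyListGt ys zs := by
  induction ys generalizing zs with
  | nil =>
    cases zs with
    | nil => simp [pyListGt]
    | cons z zs => simp at h
  | cons y ys ih =>
    cases zs with
    | nil => simp at h
    | cons z zs =>
      simp only [List.length_cons, Nat.add_right_cancel_iff] at h
      by_cases hyz : y = z
      · simp [pyListGt, hyz, ih zs h]
      · simp [pyListGt, hyz]

-- shifting the loop one element to the right past a cons cell
theorem loop_shift (m : List Int) (c : Int) (h t : Int) (hh : 0 ≤ h) :
    isHeadHeavyLoop (c :: m) (h + 1) (t + 1) = isHeadHeavyLoop m h t := by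
  by_cases hlt : h < t
  · have h1 : PySem.List.pyGet? (c :: m) (h + 1) = PySem.List.pyGet? m h := by
      have e : h = ((h.toNat : Nat) : Int) := by omega
      rw [e, PySem.List.pyGet?_cons_succ]
    have h2 : PySem.List.pyGet? (c :: m) (t + 1) = PySem.List.pyGet? m t := by
      have e : t = ((t.toNat : Nat) : Int) := by omega
      rw [e, PySem.List.pyGet?_cons_succ]
    conv_lhs => rw [isHeadHeavyLoop]
    conv_rhs => rw [isHeadHeavyLoop]
    simp only [dif_pos (by omega : h + 1 < t + 1), dif_pos hlt, h1, h2]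
    cases hg1 : PySem.List.pyGet? m h with
    | none => rfl
    | some a =>
      cases hg2 : PySem.List.pyGet? m t with
      | none => rfl
      | some b =>
        by_cases hab : a > b
        · simp [hab]
        · by_cases hba : a < b
          · simp [hab, hba]
          · simp only [if_neg hab, if_neg hba]
            have e : t + 1 - 1 = t - 1 + 1 := by omega
            rw [e]
            exact loop_shift m c (h + 1) (t - 1) (by omega)
  · conv_lhs => rw [isHeadHeavyLoop]
    conv_rhs => rw [isHeadHeavyLoop]
    simp [dif_neg hlt]
termination_by (t - h).toNat
decreasing_by omega

-- the loop never looks past index t, so a trailing element is irrelevant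
theorem loop_append (m : List Int) (b : Int) (h t : Int) (hh : 0 ≤ h)
    (ht : t < (m.length : Int)) :
    isHeadHeavyLoop (m ++ [b]) h t = isHeadHeavyLoop m h t := by
  by_cases hlt : h < t
  · have h1 : PySem.List.pyGet? (m ++ [b]) h = PySem.List.pyGet? m h := by
      rw [PySem.List.pyGet?_of_nonneg _ hh, PySem.List.pyGet?_of_nonneg _ hh]
      rw [List.getElem?_append_left (by omega)]
    have h2 : PySem.List.pyGet? (m ++ [b]) t = PySem.List.pyGet? m t := by
      rw [PySem.List.pyGet?_of_nonneg _ (by omega : (0:Int) ≤ t),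
        PySem.List.pyGet?_of_nonneg _ (by omega : (0:Int) ≤ t)]
      rw [List.getElem?_append_left (by omega)]
    conv_lhs => rw [isHeadHeavyLoop]
    conv_rhs => rw [isHeadHeavyLoop]
    simp only [dif_pos hlt, h1, h2]
    cases hg1 : PySem.List.pyGet? m h with
    | none => rfl
    | some a =>
      cases hg2 : PySem.List.pyGet? m t with
      | none => rfl
      | some bb =>
        by_cases hab : a > bb
        · simp [hab]
        · by_cases hba : a < bb
          · simp [hab, hba]
          · simp only [if_neg hab, if_neg hba]
            exact loop_append m b (h + 1) (t - 1) (by omega) (by omega)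
  · conv_lhs => rw [isHeadHeavyLoop]
    conv_rhs => rw [isHeadHeavyLoop]
    simp [dif_neg hlt]
termination_by (t - h).toNat
decreasing_by omega

-- main equivalence, by strong induction on the length, peeling both ends
theorem main_equiv : ∀ (n : Nat) (xs : List Int), xs.length = n →
    isHeadHeavyLoop xs 0 ((xs.length : Int) - 1) = pyListGt xs xs.reverse := by
  intro n
  induction n using Nat.strong_induction_on with
  | _ n ih =>
    intro xs hlen
    match xs with
    | [] => rw [isHeadHeavyLoop]; simp [pyListGt]
    | [a] => rw [isHeadHeavyLoop]; simp [pyListGt]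
    | a :: x :: rest =>
      -- write a :: x :: rest as a :: ys ++ [b]
      obtain ⟨ys, b, hsplit⟩ : ∃ ys b, x :: rest = ys ++ [b] := by
        rcases List.eq_nil_or_concat (x :: rest) with hnil | ⟨ys, b, hc⟩
        · simp at hnil
        · exact ⟨ys, b, by simpa using hc⟩
      rw [hsplit]
      have hlen' : (a :: (ys ++ [b])).length = ys.length + 2 := by simp
      -- index facts
      have hidx0 : PySem.List.pyGet? (a :: (ys ++ [b])) 0 = some a := by
        simp [PySem.List.pyGet?_zero_cons]
      have hidxl : PySem.List.pyGet? (a :: (ys ++ [b]))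
          (((a :: (ys ++ [b])).length : Int) - 1) = some b := by
        have : ((a :: (ys ++ [b])).length : Int) - 1 = (((a :: ys).length : Nat) : Int) := by
          simp
        rw [this, PySem.List.pyGet?_natCast]
        have : a :: (ys ++ [b]) = (a :: ys) ++ [b] := by simp
        rw [this, List.getElem?_append_right (by simp)]
        simp
      -- reverse shape
      have hrev : (a :: (ys ++ [b])).reverse = b :: (ys.reverse ++ [a]) := by simp
      rw [isHeadHeavyLoop]
      have hlt : (0 : Int) < ((a :: (ys ++ [b])).length : Int) - 1 := by
        rw [hlen']; push_cast; omega
      simp only [dif_pos hlt, hidx0, hidxl, hrev]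
      by_cases hab : a > b
      · simp [pyListGt, hab, ne_of_gt hab]
      · by_cases hba : a < b
        · simp [pyListGt, hab, hba, ne_of_lt hba]
        · have heq : a = b := le_antisymm (not_lt.mp hab) (not_lt.mp hba)
          simp only [if_neg hab, if_neg hba]
          -- A side: shift, then drop the trailing b
          have hA : isHeadHeavyLoop (a :: (ys ++ [b])) (0 + 1)
              (((a :: (ys ++ [b])).length : Int) - 1 - 1)
              = isHeadHeavyLoop ys 0 ((ys.length : Int) - 1) := by
            have e1 : ((a :: (ys ++ [b])).length : Int) - 1 - 1
                = ((ys.length : Int) - 1) + 1 := by rw [hlen']; push_cast; ring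
            rw [e1, loop_shift (ys ++ [b]) a 0 ((ys.length : Int) - 1) le_rfl]
            exact loop_append ys b 0 ((ys.length : Int) - 1) le_rfl (by omega)
          -- B side: strip the equal heads and the equal trailing elements
          have hB : pyListGt (a :: (ys ++ [b])) (b :: (ys.reverse ++ [a]))
              = pyListGt ys ys.reverse := by
            have : pyListGt (a :: (ys ++ [b])) (b :: (ys.reverse ++ [a]))
                = pyListGt (ys ++ [b]) (ys.reverse ++ [a]) := by
              simp [pyListGt, heq]
            rw [this, ← heq, pyListGt_append_same ys ys.reverse a (by simp)]
          rw [hA, hB]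
          have hn : ys.length + 2 = n := by
            rw [← hlen, hsplit]; simp
          exact ih ys.length (by omega) ys rfl

-- ===== VERDICT (by name: the statement is the Claim_ definition above) =====
theorem is_head_heavy_spec : Claim_equal_is_head_heavy := by
  intro items _
  unfold Spec_is_head_heavy is_head_heavy is_head_heavy_alt
  exact main_equiv items.length items rfl
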